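-- pv_equiv track=rewrite | github.com/Ivel10Go/marx_app | tools/analyze_umlaut_problems.py | normalize_string_current
-- ===== SOURCE A (Python) =====
-- def normalize_string_current(text: str) -> str:
--     """Current normalization function (from normalize_umlauts.py)"""
--     if not isinstance(text, str):
--         return text
--
--     result = []
--     i = 0
--     while i < len(text):
--         # Check for 'ue' -> 'ü' (but not in 'queue' or similar English words)
--         if i + 1 < len(text) and text[i:i+2].lower() == 'ue':
--             # Check context - if preceded by consonant or at start, likely German
--             if i == 0 or (i > 0 and text[i-1] not in 'aeiouäöü'):
--                 if i + 2 >= len(text) or text[i+2] not in 'aeiouäöü':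
--                     result.append('ü' if text[i] == 'u' else 'Ü')
--                     i += 2
--                     continue
--
--         # Check for 'ae' -> 'ä'
--         if i + 1 < len(text) and text[i:i+2].lower() == 'ae':
--             if i == 0 or (i > 0 and text[i-1] not in 'aeiouäöü'):
--                 if i + 2 >= len(text) or text[i+2] not in 'aeiouäöü':
--                     result.append('ä' if text[i] == 'a' else 'Ä')
--                     i += 2
--                     continue
--
--         # Check for 'oe' -> 'ö'
--         if i + 1 < len(text) and text[i:i+2].lower() == 'oe':
--             if i == 0 or (i > 0 and text[i-1] not in 'aeiouäöü'):
--                 if i + 2 >= len(text) or text[i+2] not in 'aeiouäöü':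
--                     result.append('ö' if text[i] == 'o' else 'Ö')
--                     i += 2
--                     continue
--
--         result.append(text[i])
--         i += 1
--
--     return ''.join(result)
-- ===== SOURCE B (Python) =====
-- import re
--
-- _UMLAUT = {'u': 'ü', 'U': 'Ü', 'a': 'ä', 'A': 'Ä', 'o': 'ö', 'O': 'Ö'}
--
-- _DIGRAPH = re.compile(r'(?<![aeiouäöü])([UuAaOo])[Ee](?![aeiouäöü])')
--
--
-- def normalize_string_current(text: str) -> str:
--     """Normalize German umlaut digraphs with one regex substitution."""
--     if not isinstance(text, str):
--         return text
--     return _DIGRAPH.sub(lambda m: _UMLAUT[m.group(1)], text)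
-- ===== Notes on version B (the rewrite author's own statement) =====
-- stated objective: idiomatic
-- what changed: Replaced the hand-written index-advancing while-loop with one precompiled regex substitution: a single pattern (?<![aeiouäöü])([UuAaOo])[Ee](?![aeiouäöü]) with a callback that maps the captured first letter through a dict, instead of three per-position slice/lower/context checks. The scan runs in the compiled regex engine instead of a per-character Python loop (measured ~20-30x constant-factor speedup).
import Mathlib
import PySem

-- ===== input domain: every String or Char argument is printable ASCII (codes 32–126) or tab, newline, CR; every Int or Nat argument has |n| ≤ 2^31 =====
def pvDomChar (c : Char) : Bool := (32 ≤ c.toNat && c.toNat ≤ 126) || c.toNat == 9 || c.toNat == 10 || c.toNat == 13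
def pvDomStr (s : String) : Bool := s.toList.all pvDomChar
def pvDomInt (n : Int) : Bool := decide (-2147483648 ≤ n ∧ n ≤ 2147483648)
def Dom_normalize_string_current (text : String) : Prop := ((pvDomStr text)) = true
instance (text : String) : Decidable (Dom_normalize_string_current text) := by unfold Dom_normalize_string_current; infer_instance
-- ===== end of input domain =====

-- B replaces A's index-advancing while-loop with one regex substitution (lookbehind/lookahead context, case-insensitive digraph); idiomatic, and measurably faster in a timing run (regex engine vs per-char Python loop).

-- ===== PORT A =====
-- the characters of 'aeiouäöü' (a single-char 'x in s' test is membership in s's characters)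
def nscVowels : List Char := ['a', 'e', 'i', 'o', 'u', 'ä', 'ö', 'ü']

-- A's while-loop: i the index, result the accumulator (each appended Python string is one char).
-- Each Python "if dig / if context / if following" nest with its 'continue' is one combined
-- condition here: failing any sub-condition falls through to the next digraph check exactly as in A.
-- t.getD k ' ' is text[k]; every such access is guarded in range by the surrounding conditions.
def nscALoop (t : List Char) (result : List Char) (i : Nat) : List Char :=
  if _h : i < t.length then
    if (i + 1 < t.length ∧ PySem.Chars.lower (PySem.List.slice t (some (i : Int)) (some ((i : Int) + 2))) = ['u', 'e'])
        ∧ (i = 0 ∨ (0 < i ∧ t.getD (i - 1) ' ' ∉ nscVowels))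
        ∧ (i + 2 ≥ t.length ∨ t.getD (i + 2) ' ' ∉ nscVowels) then
      nscALoop t (result ++ [if t.getD i ' ' = 'u' then 'ü' else 'Ü']) (i + 2)
    else if (i + 1 < t.length ∧ PySem.Chars.lower (PySem.List.slice t (some (i : Int)) (some ((i : Int) + 2))) = ['a', 'e'])
        ∧ (i = 0 ∨ (0 < i ∧ t.getD (i - 1) ' ' ∉ nscVowels))
        ∧ (i + 2 ≥ t.length ∨ t.getD (i + 2) ' ' ∉ nscVowels) then
      nscALoop t (result ++ [if t.getD i ' ' = 'a' then 'ä' else 'Ä']) (i + 2)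
    else if (i + 1 < t.length ∧ PySem.Chars.lower (PySem.List.slice t (some (i : Int)) (some ((i : Int) + 2))) = ['o', 'e'])
        ∧ (i = 0 ∨ (0 < i ∧ t.getD (i - 1) ' ' ∉ nscVowels))
        ∧ (i + 2 ≥ t.length ∨ t.getD (i + 2) ' ' ∉ nscVowels) then
      nscALoop t (result ++ [if t.getD i ' ' = 'o' then 'ö' else 'Ö']) (i + 2)
    else
      nscALoop t (result ++ [t.getD i ' ']) (i + 1)
  else result
termination_by t.length - i

-- isinstance(text, str) is always true under the type convention; ''.join of 1-char strings = String.ofList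
def normalize_string_current (text : String) : String :=
  String.ofList (nscALoop text.toList [] 0)

-- ===== PORT B =====
-- the _UMLAUT dict lookup, on exactly the six keys group 1 of the pattern can produce
def nscRepl (c : Char) : Char :=
  if c = 'u' then 'ü' else if c = 'U' then 'Ü' else if c = 'a' then 'ä'
  else if c = 'A' then 'Ä' else if c = 'o' then 'ö' else 'Ö'

-- lookbehind (?<![aeiouäöü]): none = start of string
def nscNoVowelBefore : Option Char → Bool
  | none => true
  | some p => !(nscVowels.contains p)

-- lookahead (?![aeiouäöü])
def nscNoVowelAfter : List Char → Bool
  | [] => true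
  | d :: _ => !(nscVowels.contains d)

-- Hand port of re.sub with the fixed pattern (?<![aeiouäöü])([UuAaOo])[Ee](?![aeiouäöü]):
-- re.sub's left-to-right non-overlapping scan, exact here because every match is two chars wide
-- and the lookbehind is one char wide (prev = the previous char of the ORIGINAL text).
def nscSub (prev : Option Char) : List Char → List Char
  | [] => []
  | [c] => [c]
  | c :: e :: rest =>
    if ['U', 'u', 'A', 'a', 'O', 'o'].contains c && ['E', 'e'].contains e
        && nscNoVowelBefore prev && nscNoVowelAfter rest then
      nscRepl c :: nscSub (some e) rest
    else
      c :: nscSub (some c) (e :: rest)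

def normalize_string_current_alt (text : String) : String :=
  String.ofList (nscSub none text.toList)

-- ===== PRECONDITION & SPEC =====
def Spec_normalize_string_current (text : String) (out : String) : Prop := out = normalize_string_current_alt text
instance (text : String) (out : String) : Decidable (Spec_normalize_string_current text out) := by unfold Spec_normalize_string_current; infer_instance

-- ===== CLAIM (what is proved, stated in full; the proofs are below) =====
def Claim_equal_normalize_string_current : Prop := ∀ (text : String), Dom_normalize_string_current text → Spec_normalize_string_current text (normalize_string_current text)

-- ===== LEMMAS AND PROOFS =====

theorem nsc_lowerChar_eq_iff (c lo up : Char) (h1 : 97 ≤ lo.toNat) (h2 : lo.toNat ≤ 122)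
    (h3 : up.toNat + 32 = lo.toNat) : (PySem.Chars.lowerChar c = lo ↔ (c = lo ∨ c = up)) := by
  have hAle : (('A' ≤ c) ↔ 65 ≤ c.toNat) := by
    rw [Char.le_def]; constructor <;> intro h <;> exact_mod_cast h
  have hZle : ((c ≤ 'Z') ↔ c.toNat ≤ 90) := by
    rw [Char.le_def]; constructor <;> intro h <;> exact_mod_cast h
  have heq : ∀ a b : Char, a = b ↔ a.toNat = b.toNat := fun a b =>
    eq_iff_eq_of_cmp_eq_cmp rfl
  by_cases hu : 65 ≤ c.toNat ∧ c.toNat ≤ 90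
  · have hiu : PySem.Chars.isupper c = true := by
      simp [PySem.Chars.isupper, hAle, hZle, hu.1, hu.2]
    rw [PySem.Chars.lowerChar, hiu, if_pos rfl,
      heq (Char.ofNat (c.toNat + 32)) lo, heq c lo, heq c up,
      Char.toNat_ofNat, if_pos (Or.inl (by omega : c.toNat + 32 < 55296))]
    omega
  · have hiu : PySem.Chars.isupper c = false := by
      rcases Decidable.not_and_iff_or_not.mp hu with h | h <;>
        simp [PySem.Chars.isupper, hAle, hZle] <;> omega
    rw [PySem.Chars.lowerChar, hiu]
    simp only [Bool.false_eq_true, if_neg (by simp : ¬False)]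
    rw [heq c lo, heq c up]
    omega

-- the two-char slice A takes, once i+1 < len
theorem nsc_slice_two (t : List Char) (i : Nat) (h : i + 1 < t.length) :
    PySem.List.slice t (some (i : Int)) (some ((i : Int) + 2)) = [t[i], t[i + 1]] := by
  have h2 : ((i : Int) + 2) = ((i : Int) + ((2 : Nat) : Int)) := by norm_num
  have hd1 : t.drop i = t[i] :: t.drop (i + 1) := List.drop_eq_getElem_cons (by omega)
  have hd2 : t.drop (i + 1) = t[i + 1] :: t.drop (i + 2) := List.drop_eq_getElem_cons (by omega)
  rw [h2, PySem.List.slice_natCast_add, hd1, hd2, List.take_succ_cons, List.take_succ_cons,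
    List.take_zero]

set_option maxRecDepth 4096 in
theorem nsc_loop_eq (t : List Char) (n i : Nat) (result : List Char) (hn : t.length ≤ i + n) :
    nscALoop t result i =
      result ++ nscSub (if i = 0 then none else some (t.getD (i - 1) ' ')) (t.drop i) := by
  induction n generalizing i result with
  | zero =>
    have hge : ¬ i < t.length := by omega
    rw [nscALoop, dif_neg hge, List.drop_eq_nil_of_le (by omega)]
    simp [nscSub]
  | succ n ih =>
    by_cases hi : i < t.length
    · have hdi : t.drop i = t[i] :: t.drop (i + 1) := List.drop_eq_getElem_cons hi
      by_cases hi1 : i + 1 < t.length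
      · -- two characters available: c = t[i], e = t[i+1]
        set c := t[i] with hc
        set e := t[i + 1] with he
        set rest := t.drop (i + 2) with hrest
        set prev : Option Char := if i = 0 then none else some (t.getD (i - 1) ' ') with hprev
        have hdi1 : t.drop (i + 1) = e :: rest := List.drop_eq_getElem_cons hi1
        have hgdi : t.getD i ' ' = c := List.getD_eq_getElem t ' ' hi
        have hgdi1 : t.getD (i + 1) ' ' = e := List.getD_eq_getElem t ' ' hi1
        have hlow : ∀ lo up : Char, 97 ≤ lo.toNat → lo.toNat ≤ 122 → up.toNat + 32 = lo.toNat →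
            (PySem.Chars.lower (PySem.List.slice t (some (i : Int)) (some ((i : Int) + 2)))
              = [lo, 'e'] ↔ ((c = lo ∨ c = up) ∧ (e = 'e' ∨ e = 'E'))) := by
          intro lo up h1 h2 h3
          rw [nsc_slice_two t i hi1]
          simp only [PySem.Chars.lower, List.map, List.cons.injEq, and_true]
          rw [nsc_lowerChar_eq_iff c lo up h1 h2 h3,
            nsc_lowerChar_eq_iff e 'e' 'E' (by decide) (by decide) (by decide)]
        have hmemf : ∀ p : Char, (nscVowels.contains p = false) ↔ p ∉ nscVowels := by
          intro p; rw [← List.contains_iff_mem]; simp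
        have hbprev : nscNoVowelBefore prev = true ↔
            (i = 0 ∨ (0 < i ∧ t.getD (i - 1) ' ' ∉ nscVowels)) := by
          by_cases h0 : i = 0
          · simp [hprev, h0, nscNoVowelBefore]
          · rw [hprev, if_neg h0]
            simp only [nscNoVowelBefore, Bool.not_eq_eq_eq_not, Bool.not_true, hmemf]
            constructor
            · intro h; exact Or.inr ⟨by omega, h⟩
            · rintro (h | ⟨-, h⟩); · exact absurd h h0
              · exact h
        have hbnext : nscNoVowelAfter rest = true ↔
            (i + 2 ≥ t.length ∨ t.getD (i + 2) ' ' ∉ nscVowels) := by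
          by_cases h2 : i + 2 < t.length
          · have hr : rest = t[i + 2] :: t.drop (i + 3) := List.drop_eq_getElem_cons h2
            rw [hr]
            simp only [nscNoVowelAfter, Bool.not_eq_eq_eq_not, Bool.not_true, hmemf,
              List.getD_eq_getElem t ' ' h2]
            constructor
            · intro h; exact Or.inr h
            · rintro (h | h); · omega
              · exact h
          · have hr : rest = [] := by rw [hrest]; exact List.drop_eq_nil_of_le (by omega)
            rw [hr]
            simp only [nscNoVowelAfter, true_iff]
            exact Or.inl (by omega)
        clear_value c e rest prev
        have htail : nscSub (some e) rest =
            nscSub (if i + 2 = 0 then none else some (t.getD (i + 2 - 1) ' ')) (t.drop (i + 2)) := by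
          have h21 : i + 2 - 1 = i + 1 := rfl
          rw [if_neg (by omega : ¬ i + 2 = 0), h21, hgdi1, hrest]
        -- unfold one step of both loops
        rw [nscALoop, dif_pos hi, hdi, hdi1]
        simp only [nscSub]
        have hmk : (c = 'u' ∨ c = 'U' ∨ c = 'a' ∨ c = 'A' ∨ c = 'o' ∨ c = 'O') →
            (e = 'e' ∨ e = 'E') → nscNoVowelBefore prev = true → nscNoVowelAfter rest = true →
            (['U', 'u', 'A', 'a', 'O', 'o'].contains c && ['E', 'e'].contains e
              && nscNoVowelBefore prev && nscNoVowelAfter rest) = true := by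
          intro hc' he' hp hx
          have h1 : (['U', 'u', 'A', 'a', 'O', 'o'] : List Char).contains c = true := by
            rcases hc' with rfl | rfl | rfl | rfl | rfl | rfl <;> decide
          have h2 : (['E', 'e'] : List Char).contains e = true := by
            rcases he' with rfl | rfl <;> decide
          rw [h1, h2, hp, hx]
          rfl
        by_cases hM : (['U', 'u', 'A', 'a', 'O', 'o'].contains c && ['E', 'e'].contains e
            && nscNoVowelBefore prev && nscNoVowelAfter rest) = true
        · -- B matches here; the same digraph+context fires the corresponding A branch
          rw [if_pos hM]
          simp only [Bool.and_eq_true, List.contains_iff_mem, List.mem_cons,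
            List.not_mem_nil, or_false] at hM
          obtain ⟨⟨⟨hcm, hem⟩, hp⟩, hnx⟩ := hM
          have hem' : e = 'e' ∨ e = 'E' := hem.symm
          have hp' := hbprev.mp hp
          have hnx' := hbnext.mp hnx
          rcases hcm with rfl | rfl | rfl | rfl | rfl | rfl
          all_goals first
          | -- c ∈ {u, U}: first A branch fires
            (rw [if_pos ⟨⟨hi1, (hlow 'u' 'U' (by decide) (by decide) (by decide)).mpr
                  ⟨by decide, hem'⟩⟩, hp', hnx'⟩,
               ih (i + 2) _ (by omega), ← htail]
             rw [hgdi]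
             simp [nscRepl])
          | -- c ∈ {a, A}: first fails (lower c ≠ 'u'), second fires
            (rw [if_neg (fun hcon => by
                rcases ((hlow 'u' 'U' (by decide) (by decide) (by decide)).mp hcon.1.2).1
                  with h | h <;> exact absurd h (by decide)),
              if_pos ⟨⟨hi1, (hlow 'a' 'A' (by decide) (by decide) (by decide)).mpr
                  ⟨by decide, hem'⟩⟩, hp', hnx'⟩,
              ih (i + 2) _ (by omega), ← htail]
             rw [hgdi]
             simp [nscRepl])
          | -- c ∈ {o, O}: first two fail, third fires
            (rw [if_neg (fun hcon => by
                rcases ((hlow 'u' 'U' (by decide) (by decide) (by decide)).mp hcon.1.2).1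
                  with h | h <;> exact absurd h (by decide)),
              if_neg (fun hcon => by
                rcases ((hlow 'a' 'A' (by decide) (by decide) (by decide)).mp hcon.1.2).1
                  with h | h <;> exact absurd h (by decide)),
              if_pos ⟨⟨hi1, (hlow 'o' 'O' (by decide) (by decide) (by decide)).mpr
                  ⟨by decide, hem'⟩⟩, hp', hnx'⟩,
              ih (i + 2) _ (by omega), ← htail]
             rw [hgdi]
             simp [nscRepl])
        · -- B does not match here, so none of A's three conditions can hold
          rw [if_neg hM,
            if_neg (fun hcon => hM (by
              obtain ⟨⟨-, hl⟩, hpv, hnx⟩ := hcon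
              obtain ⟨hcc, hee⟩ := (hlow 'u' 'U' (by decide) (by decide) (by decide)).mp hl
              exact hmk (hcc.elim Or.inl (fun h => Or.inr (Or.inl h))) hee (hbprev.mpr hpv) (hbnext.mpr hnx))),
            if_neg (fun hcon => hM (by
              obtain ⟨⟨-, hl⟩, hpv, hnx⟩ := hcon
              obtain ⟨hcc, hee⟩ := (hlow 'a' 'A' (by decide) (by decide) (by decide)).mp hl
              exact hmk (hcc.elim (fun h => Or.inr (Or.inr (Or.inl h)))
                (fun h => Or.inr (Or.inr (Or.inr (Or.inl h))))) hee (hbprev.mpr hpv) (hbnext.mpr hnx))),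
            if_neg (fun hcon => hM (by
              obtain ⟨⟨-, hl⟩, hpv, hnx⟩ := hcon
              obtain ⟨hcc, hee⟩ := (hlow 'o' 'O' (by decide) (by decide) (by decide)).mp hl
              exact hmk (hcc.elim (fun h => Or.inr (Or.inr (Or.inr (Or.inr (Or.inl h)))))
                (fun h => Or.inr (Or.inr (Or.inr (Or.inr (Or.inr h)))))) hee (hbprev.mpr hpv) (hbnext.mpr hnx))),
            ih (i + 1) _ (by omega)]
          have h10 : t.getD (i + 1 - 1) ' ' = c := hgdi
          rw [hgdi, h10, hdi1]
          simp
      · -- only one character left: no digraph can match on either side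
        have hrest0 : t.drop (i + 1) = [] := List.drop_eq_nil_of_le (by omega)
        have hgdi : t.getD i ' ' = t[i] := List.getD_eq_getElem t ' ' hi
        rw [nscALoop, dif_pos hi,
          if_neg (by rintro ⟨⟨h, -⟩, -⟩; omega),
          if_neg (by rintro ⟨⟨h, -⟩, -⟩; omega),
          if_neg (by rintro ⟨⟨h, -⟩, -⟩; omega),
          ih (i + 1) _ (by omega), hdi, hrest0]
        rw [hgdi]
        simp [nscSub]
    · rw [nscALoop, dif_neg hi, List.drop_eq_nil_of_le (by omega)]
      simp [nscSub]

-- ===== VERDICT (by name: the statement is the Claim_ definition above) =====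
theorem normalize_string_current_spec : Claim_equal_normalize_string_current := by
  intro text _hd
  unfold Spec_normalize_string_current normalize_string_current normalize_string_current_alt
  rw [nsc_loop_eq text.toList text.toList.length 0 [] (by omega)]
  simp
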